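-- pv_equiv track=rewrite | github.com/hariprasath-ai-dev/icd-10-code-assist | rule_engine.py | _drop_less_specific_family_codes
-- ===== SOURCE A (Python) =====
-- def _drop_less_specific_family_codes(codes):
--     cleaned_codes = []
--     for code in sorted(set(codes), key=lambda item: (len(item), item)):
--         more_specific_exists = any(
--             other != code and other.startswith(code) and len(other) > len(code) for other in codes
--         )
--         if not more_specific_exists:
--             cleaned_codes.append(code)
--     return sorted(cleaned_codes)
-- ===== SOURCE B (Python) =====
-- def _drop_less_specific_family_codes(codes):
--     # Sort the distinct codes; in lexicographic order a code has a more-specific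
--     # descendant iff its immediate successor starts with it.
--     sc = sorted(set(codes))
--     out = []
--     for cur, nxt in zip(sc, sc[1:]):
--         if not nxt.startswith(cur):
--             out.append(cur)
--     if sc:
--         out.append(sc[-1])
--     return out
-- ===== Notes on version B (the rewrite author's own statement) =====
-- stated objective: faster
-- what changed: Replaces A's O(n^2*L) scan (for every distinct code, test every code for a longer-prefix extension) by sort-then-adjacent-check: after sorting the distinct codes, a code has a more-specific descendant iff its immediate lexicographic successor starts with it.
import Mathlib
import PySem

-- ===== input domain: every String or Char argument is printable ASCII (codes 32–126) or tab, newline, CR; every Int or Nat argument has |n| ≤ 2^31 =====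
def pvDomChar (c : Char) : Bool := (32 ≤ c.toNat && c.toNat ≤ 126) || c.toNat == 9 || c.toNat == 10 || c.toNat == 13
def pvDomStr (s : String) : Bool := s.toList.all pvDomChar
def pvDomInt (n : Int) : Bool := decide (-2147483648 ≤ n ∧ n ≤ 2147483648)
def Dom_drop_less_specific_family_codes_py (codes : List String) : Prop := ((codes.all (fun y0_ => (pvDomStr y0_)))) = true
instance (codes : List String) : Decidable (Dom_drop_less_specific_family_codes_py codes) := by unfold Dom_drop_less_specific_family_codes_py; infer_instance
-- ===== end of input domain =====

-- B replaces A's quadratic any-scan by sort-then-adjacent-check: after sorting the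
-- distinct codes, a code has a more-specific (longer-prefix) descendant iff its
-- immediate lexicographic successor starts with it (objective: faster, asymptotic).

-- ===== PORT A =====
def drop_less_specific_family_codes_py (codes : List String) : List String :=
  -- for code in sorted(set(codes), key=lambda item: (len(item), item)): …
  let cleaned := (PySem.List.sorted2 (PySem.Set.ofList codes)
      (fun item => PySem.Str.len item) (fun item => item)).foldl
    (fun acc code =>
      -- more_specific_exists = any(other != code and other.startswith(code) and len(other) > len(code) for other in codes)
      if !(codes.any (fun other =>
            (other != code) && PySem.Str.startswith other code
              && decide (PySem.Str.len other > PySem.Str.len code)))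
      then acc ++ [code] else acc) []
  PySem.List.sorted cleaned (fun x => x) false

-- ===== PORT B =====
def drop_less_specific_family_codes_py_alt (codes : List String) : List String :=
  let sc := PySem.List.sorted (PySem.Set.ofList codes) (fun x => x) false
  -- for cur, nxt in zip(sc, sc[1:]): if not nxt.startswith(cur): out.append(cur)
  let out := (sc.zip (PySem.List.slice sc (some 1) none)).foldl
    (fun acc p => if PySem.Str.startswith p.2 p.1 then acc else acc ++ [p.1]) []
  -- if sc: out.append(sc[-1])  — pyGet? sc (-1) is some (last element) exactly when sc is nonempty
  match PySem.List.pyGet? sc (-1) with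
  | some l => out ++ [l]
  | none => out

-- ===== PRECONDITION & SPEC =====
def Spec_drop_less_specific_family_codes_py (codes : List String) (out : List String) : Prop := out = drop_less_specific_family_codes_py_alt codes
instance (codes : List String) (out : List String) : Decidable (Spec_drop_less_specific_family_codes_py codes out) := by unfold Spec_drop_less_specific_family_codes_py; infer_instance

-- ===== CLAIM (what is proved, stated in full; the proofs are below) =====
def Claim_equal_drop_less_specific_family_codes_py : Prop := ∀ (codes : List String), Dom_drop_less_specific_family_codes_py codes → Spec_drop_less_specific_family_codes_py codes (drop_less_specific_family_codes_py codes)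

-- ===== LEMMAS AND PROOFS =====

-- The pairwise scan B performs over the sorted distinct codes, as a structural recursion.
def pvGo : List String → List String
  | [] => []
  | [c] => [c]
  | c :: d :: t => if PySem.Str.startswith d c then pvGo (d :: t) else c :: pvGo (d :: t)

-- A's `more_specific_exists` test, negated (the keep-predicate of A's loop).
def pvKeep (codes : List String) (code : String) : Bool :=
  !(codes.any (fun other =>
      (other != code) && PySem.Str.startswith other code
        && decide (PySem.Str.len other > PySem.Str.len code)))

-- a proper prefix is lexicographically smaller
lemma pv_prefix_lex {c d : List Char} (h : c <+: d) (hne : c ≠ d) : List.Lex (·<·) c d := by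
  rcases h with ⟨t, rfl⟩
  cases t with
  | nil => simp at hne
  | cons a t =>
    clear hne
    induction c with
    | nil => exact List.Lex.nil
    | cons x c ih => exact List.Lex.cons ih

-- squeeze: c < s ≤ d together with c a prefix of d force c a prefix of s
lemma pv_squeeze : ∀ (c s d : List Char), List.Lex (·<·) c s → (s = d ∨ List.Lex (·<·) s d) →
    c <+: d → c <+: s := by
  intro c
  induction c with
  | nil => intro s d _ _ _; exact List.nil_prefix
  | cons a c ih =>
    intro s d h1 h2 hp
    obtain ⟨d', hd, hp'⟩ : ∃ d', d = a :: d' ∧ c <+: d' := by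
      rcases hp with ⟨t, rfl⟩; exact ⟨c ++ t, rfl, List.prefix_append _ _⟩
    subst hd
    cases h1 with
    | rel hab =>
      rename_i b s'
      exfalso
      rcases h2 with heq | h2
      · injection heq with h _; subst h; exact lt_irrefl _ hab
      · cases h2 with
        | rel hba => exact absurd hab (asymm hba)
        | cons h => exact lt_irrefl a hab
    | cons h1' =>
      rename_i s'
      rcases h2 with heq | h2
      · injection heq with _ h; subst h; exact hp
      · cases h2 with
        | rel hba => exact absurd hba (lt_irrefl a)
        | cons h2' => exact List.cons_prefix_cons.mpr ⟨rfl, ih s' d' h1' (Or.inr h2') hp'⟩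

-- string-level restatements
lemma pv_str_lt_iff (s t : String) : s < t ↔ List.Lex (·<·) s.toList t.toList :=
  String.lt_iff_toList_lt

lemma pv_startswith_iff (s p : String) : PySem.Str.startswith s p = true ↔ p.toList <+: s.toList := by
  simp [PySem.Str.startswith_eq, PySem.Chars.startswith_iff]

lemma pv_toList_inj {s t : String} (h : s.toList = t.toList) : s = t := by
  exact String.toList_inj.mp h

lemma pv_keep_iff (codes : List String) (sc : List String)
    (hmem : ∀ x, x ∈ sc ↔ x ∈ codes) (c : String) :
    pvKeep codes c = true ↔ ∀ d ∈ sc, c.toList <+: d.toList → d = c := by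
  unfold pvKeep
  simp only [Bool.not_eq_true', List.any_eq_false, Bool.and_eq_false_iff,
    Bool.not_eq_true, bne_eq_false_iff_eq]
  constructor
  · intro h d hd hpre
    have hd' := h d ((hmem d).1 hd)
    by_contra hne
    have hlt : c.toList.length < d.toList.length := by
      rcases lt_or_eq_of_le hpre.length_le with h' | h'
      · exact h'
      · exact absurd (pv_toList_inj (hpre.eq_of_length h')) (fun e => hne e.symm)
    rcases hd' with h' | h'
    · rcases h' with h' | h'
      · exact hne h'
      · rw [← Bool.not_eq_true, pv_startswith_iff] at h'; exact h' hpre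
    · simp only [decide_eq_false_iff_not, not_lt, PySem.Str.len_eq] at h'
      omega
  · intro h d hd
    by_cases hsw : PySem.Str.startswith d c = true
    · have := h d ((hmem d).2 hd) ((pv_startswith_iff d c).1 hsw)
      subst this
      left; left; rfl
    · left; right; simpa using hsw

-- Main lemma: on a strictly <-sorted list whose keep-predicate says "no element of this
-- list strictly extends me", A's filter coincides with B's adjacent-pair scan.
lemma pv_filter_eq_go (p : String → Bool) :
    ∀ (l : List String), l.Pairwise (·<·) →
      (∀ c ∈ l, (p c = true ↔ ∀ d ∈ l, c.toList <+: d.toList → d = c)) →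
      l.filter p = pvGo l := by
  intro l
  induction l using pvGo.induct with
  | case1 => intro _ _; rfl
  | case2 c =>
    intro _ hH
    have hc : p c = true := (hH c (by simp)).2 (by intro d hd _; simpa using hd)
    simp [pvGo, List.filter, hc]
  | case3 c d t hsw ih =>
    intro hpw hH
    have hcd : c < d := (List.pairwise_cons.1 hpw).1 d (by simp)
    have hpw' : (d :: t).Pairwise (·<·) := (List.pairwise_cons.1 hpw).2
    -- the characterisation restricts to the tail
    have hH' : ∀ c' ∈ d :: t, (p c' = true ↔ ∀ e ∈ d :: t, c'.toList <+: e.toList → e = c') := by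
      intro c' hc'
      have hlt : c < c' := (List.pairwise_cons.1 hpw).1 c' hc'
      rw [hH c' (List.mem_cons_of_mem _ hc')]
      constructor
      · intro h e he hpre; exact h e (List.mem_cons_of_mem _ he) hpre
      · intro h e he hpre
        rcases List.mem_cons.1 he with heqc | he'
        · exfalso
          rw [heqc] at hpre
          by_cases heq : c'.toList = c.toList
          · rw [String.toList_inj.mp heq] at hlt; exact lt_irrefl _ hlt
          · exact lt_asymm hlt ((pv_str_lt_iff _ _).2 (pv_prefix_lex hpre heq))
        · exact h e he' hpre
    have htail := ih hpw' hH'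
    -- c has a strict extension (d itself): dropped by both
    have hpc : p c = false := by
      rw [← Bool.not_eq_true, hH c (by simp)]
      intro hall
      have := hall d (by simp) ((pv_startswith_iff d c).1 hsw)
      subst this
      exact lt_irrefl _ hcd
    have hsw' : PySem.Chars.startswith d.toList c.toList = true := by simpa using hsw
    simp [pvGo, hpc, htail, hsw']

  | case4 c d t hsw ih =>
    intro hpw hH
    have hcd : c < d := (List.pairwise_cons.1 hpw).1 d (by simp)
    have hpw' : (d :: t).Pairwise (·<·) := (List.pairwise_cons.1 hpw).2
    have hH' : ∀ c' ∈ d :: t, (p c' = true ↔ ∀ e ∈ d :: t, c'.toList <+: e.toList → e = c') := by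
      intro c' hc'
      have hlt : c < c' := (List.pairwise_cons.1 hpw).1 c' hc'
      rw [hH c' (List.mem_cons_of_mem _ hc')]
      constructor
      · intro h e he hpre; exact h e (List.mem_cons_of_mem _ he) hpre
      · intro h e he hpre
        rcases List.mem_cons.1 he with heqc | he'
        · exfalso
          rw [heqc] at hpre
          by_cases heq : c'.toList = c.toList
          · rw [String.toList_inj.mp heq] at hlt; exact lt_irrefl _ hlt
          · exact lt_asymm hlt ((pv_str_lt_iff _ _).2 (pv_prefix_lex hpre heq))
        · exact h e he' hpre
    have htail := ih hpw' hH'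
    -- no element of c::d::t strictly extends c: kept by both
    have hpc : p c = true := by
      rw [hH c (by simp)]
      intro e he hpre
      rcases List.mem_cons.1 he with rfl | he'
      · rfl
      · exfalso
        have hde : d = e ∨ List.Lex (·<·) d.toList e.toList := by
          rcases List.mem_cons.1 he' with rfl | he''
          · exact Or.inl rfl
          · exact Or.inr ((pv_str_lt_iff _ _).1 ((List.pairwise_cons.1 hpw').1 e he''))
        have : c.toList <+: d.toList := by
          apply pv_squeeze c.toList d.toList e.toList ((pv_str_lt_iff _ _).1 hcd) _ hpre
          rcases hde with rfl | h
          · exact Or.inl rfl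
          · exact Or.inr h
        exact hsw ((pv_startswith_iff d c).2 this)
    have hsw' : ¬ PySem.Chars.startswith d.toList c.toList = true := by simpa using hsw
    simp [pvGo, hpc, htail, hsw']

-- B's fold-over-zip plus final append equals the structural scan pvGo.
lemma pv_fold_go : ∀ (l acc : List String),
    (l.zip l.tail).foldl (fun acc p => if PySem.Str.startswith p.2 p.1 then acc else acc ++ [p.1]) acc
      ++ (match l.getLast? with | some x => [x] | none => []) = acc ++ pvGo l := by
  intro l
  induction l using pvGo.induct with
  | case1 => intro acc; simp [pvGo]
  | case2 c => intro acc; simp [pvGo]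
  | case3 c d t hsw ih =>
    intro acc
    simp only [List.zip_cons_cons, List.tail_cons, List.foldl_cons, List.getLast?_cons_cons]
    simp only [List.tail_cons] at ih
    rw [if_pos hsw, ih]
    have hsw' : PySem.Chars.startswith d.toList c.toList = true := by simpa using hsw
    simp [pvGo, hsw']
  | case4 c d t hsw ih =>
    intro acc
    simp only [List.zip_cons_cons, List.tail_cons, List.foldl_cons, List.getLast?_cons_cons]
    simp only [List.tail_cons] at ih
    rw [if_neg hsw, ih]
    have hsw' : ¬ PySem.Chars.startswith d.toList c.toList = true := by simpa using hsw
    simp [pvGo, hsw']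

lemma pv_alt_eq_go (codes : List String) :
    drop_less_specific_family_codes_py_alt codes = pvGo (PySem.List.sorted (PySem.Set.ofList codes) (fun x => x) false) := by
  unfold drop_less_specific_family_codes_py_alt
  dsimp only
  rw [PySem.List.slice_from_one, PySem.List.pyGet?_neg_one]
  have := pv_fold_go (PySem.List.sorted (PySem.Set.ofList codes) (fun x => x) false) []
  rw [List.nil_append] at this
  rw [← this]
  cases (PySem.List.sorted (PySem.Set.ofList codes) (fun x => x) false).getLast? <;> simp

-- ===== VERDICT (by name: the statement is the Claim_ definition above) =====
theorem drop_less_specific_family_codes_py_spec : Claim_equal_drop_less_specific_family_codes_py := by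
  unfold Claim_equal_drop_less_specific_family_codes_py Spec_drop_less_specific_family_codes_py
  intro codes _
  unfold drop_less_specific_family_codes_py
  dsimp only
  rw [pv_alt_eq_go]
  set sc := PySem.List.sorted (PySem.Set.ofList codes) (fun x => x) false with hsc
  set scl := PySem.List.sorted2 (PySem.Set.ofList codes)
      (fun item => PySem.Str.len item) (fun item => item) with hscl
  have hfold : scl.foldl
      (fun acc code => if pvKeep codes code then acc ++ [code] else acc) []
      = [] ++ scl.filter (pvKeep codes) :=
    PySem.List.foldl_append_if_eq_filter _ _ _
  rw [show (fun (acc : List String) code =>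
      if !(codes.any (fun other =>
            (other != code) && PySem.Str.startswith other code
              && decide (PySem.Str.len other > PySem.Str.len code)))
      then acc ++ [code] else acc) = (fun acc code => if pvKeep codes code then acc ++ [code] else acc) from rfl]
  rw [hfold, List.nil_append]
  have hpairwise : sc.Pairwise (·<·) := PySem.List.sorted_ofList_pairwise_lt codes
  have hperm : (sc.filter (pvKeep codes)).Perm (scl.filter (pvKeep codes)) := by
    apply List.Perm.filter
    exact (PySem.List.sorted_perm _ _ _).trans (PySem.List.sorted2_perm _ _ _ _).symm
  have hpf : (sc.filter (pvKeep codes)).Pairwise (fun a b => (fun x => x) a < (fun x => x) b) := by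
    exact hpairwise.filter _
  rw [PySem.List.sorted_eq_of_perm_of_pairwise_lt _ _ _ hperm hpf]
  apply pv_filter_eq_go
  · exact hpairwise
  · intro c _
    apply pv_keep_iff
    intro x
    rw [hsc, PySem.List.mem_sorted, PySem.Set.mem_ofList]
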